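-- pv_equiv track=rewrite | github.com/vigusmao/vigusmao.github.io | python/double_tracing.py | findDoubleTracing
-- ===== SOURCE A (Python) =====
-- N = 0
--
-- M = 1
--
-- ADJACENCY_LISTS = 2
--
-- def findDoubleTracing(G):
--
--     '''
--         currentPath: a list of triples (v, w, label) in the order the edges were visited
--         visitedEdges: a set of triples (v, w, label) indicating the edges that were already visited
--     '''
--     def backtrack(currentPath, visitedEdges, initialVertex):
--         if len(currentPath) == 2 * G[M]:
--             return True  # found a double tracing!
--
--         latestEdge = currentPath[-1] if len(currentPath) > 0 else None
--         currentVertex = latestEdge[1] if latestEdge is not None else initialVertex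
--
--         neighbors = G[ADJACENCY_LISTS].get(currentVertex)
--
--         if neighbors != None:
--             for nextVertex, multiplicity in neighbors.items():
--                 for label in range(1, multiplicity + 1):
--                     edge = (currentVertex, nextVertex, label)
--                     if edge in visitedEdges:
--                         continue  # edge already visited
--                     if len(currentPath) > 0 and currentPath[-1] == (nextVertex, currentVertex, label):
--                         continue  # avoiding U-turns
--
--                     # changes the current state
--                     currentPath.append(edge)
--                     visitedEdges.add(edge)
--
--                     if backtrack(currentPath, visitedEdges, initialVertex) == True:
--                         return True
--
--                     # restores the previous state so we can move along to the next candidate state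
--                     currentPath.pop()
--                     visitedEdges.remove(edge)
--
--         return False
--
--     ###
--
--     for initialVertex in range(1, G[N] + 1):
--         currentPath = []
--         visitedEdges = set()
--         if backtrack(currentPath, visitedEdges, initialVertex):
--             return currentPath
--
--     return None
-- ===== SOURCE B (Python) =====
-- N = 0
--
-- M = 1
--
-- ADJACENCY_LISTS = 2
--
-- def _candidates(G, vertex):
--     # lazily yields the candidate edges out of `vertex` in A's ordering:
--     # neighbors in dict order, labels 1..multiplicity
--     neighbors = G[ADJACENCY_LISTS].get(vertex)
--     if neighbors is None:
--         return
--     for nextVertex, multiplicity in neighbors.items():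
--         for label in range(1, multiplicity + 1):
--             yield (vertex, nextVertex, label)
--
-- def findDoubleTracing(G):
--     target = 2 * G[M]
--     for initialVertex in range(1, G[N] + 1):
--         currentPath = []
--         visitedEdges = set()
--         stack = [_candidates(G, initialVertex)]
--         while stack:
--             if len(currentPath) == target:
--                 return currentPath
--             top = stack[-1]
--             for edge in top:
--                 v, w, label = edge
--                 if edge in visitedEdges:
--                     continue
--                 if currentPath and currentPath[-1] == (w, v, label):
--                     continue
--                 currentPath.append(edge)
--                 visitedEdges.add(edge)
--                 stack.append(_candidates(G, w))
--                 break
--             else: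
--                 stack.pop()
--                 if stack:
--                     undone = currentPath.pop()
--                     visitedEdges.remove(undone)
--     return None
-- ===== Notes on version B (the rewrite author's own statement) =====
-- stated objective: alternative
-- what changed: The recursive backtrack helper (nested function, in-place mutation, bool return) is replaced by an explicit-stack iterative DFS: a stack of lazy candidate generators is pushed/popped inside a single while loop, consuming candidates in the same order, so the first double tracing found is identical.
import Mathlib
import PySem

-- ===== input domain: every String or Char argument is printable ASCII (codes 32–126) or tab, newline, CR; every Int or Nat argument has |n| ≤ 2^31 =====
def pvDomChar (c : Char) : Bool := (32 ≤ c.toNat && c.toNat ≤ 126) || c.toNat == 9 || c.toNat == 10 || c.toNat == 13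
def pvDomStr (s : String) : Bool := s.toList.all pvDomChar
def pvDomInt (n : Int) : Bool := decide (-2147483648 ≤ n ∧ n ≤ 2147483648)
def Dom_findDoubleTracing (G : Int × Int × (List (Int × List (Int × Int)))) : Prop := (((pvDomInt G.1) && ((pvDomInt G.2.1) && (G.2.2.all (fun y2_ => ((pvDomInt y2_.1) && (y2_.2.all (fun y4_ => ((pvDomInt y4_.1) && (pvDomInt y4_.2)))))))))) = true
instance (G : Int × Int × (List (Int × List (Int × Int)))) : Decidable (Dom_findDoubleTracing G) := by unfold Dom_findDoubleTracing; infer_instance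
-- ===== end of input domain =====

-- B replaces A's recursive backtracking by an explicit-stack iterative search over the same
-- candidate order (objective: alternative — same search, different control structure).
-- Both ports drop the Python in-place mutation of currentPath/visitedEdges and thread the
-- state functionally; the return VALUE is what is compared.  A fuel argument only makes each
-- recursion total; it is never exhausted (A's recursion depth ≤ #candidate edges + 1, B's
-- iteration count is bounded by the pvPhi potential proved below).

-- input decoding shared by both ports: the Python function receives G[2] as a dict of dicts
def pvAdj (l : List (Int × List (Int × Int))) : PySem.Dict Int (PySem.Dict Int Int) :=
  PySem.Dict.ofList (l.map (fun p => (p.1, PySem.Dict.ofList p.2)))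

-- the list of all candidate edge triples of the graph (used only as a fuel bound by the ports)
def pvAllCands (adj : PySem.Dict Int (PySem.Dict Int Int)) : List (Int × Int × Int) :=
  adj.items.flatMap (fun vn =>
    vn.2.items.flatMap (fun wm =>
      (PySem.List.pyRange 1 (wm.2 + 1) 1).map (fun label => (vn.1, wm.1, label))))

-- ===== PORT A =====
-- A's `backtrack` mutates currentPath/visitedEdges and returns True/False; the port threads
-- both functionally and returns `some completedPath` where A returns True (the caller then
-- returns exactly that path).  Loops with `return True` become foldl with a short-circuiting
-- Option accumulator; `continue` is the `none` kept by the fold step.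
def pvBacktrackA (M : Int) (adj : PySem.Dict Int (PySem.Dict Int Int)) :
    Nat → List (Int × Int × Int) → PySem.Set (Int × Int × Int) → Int →
      Option (List (Int × Int × Int))
  | 0, _, _, _ => none  -- fuel guard only; never reached
  | fuel + 1, path, visited, init =>
    if (path.length : Int) = 2 * M then some path
    else
      -- latestEdge = currentPath[-1] if any; currentVertex = latestEdge[1] else initialVertex
      let cur : Int :=
        match path.getLast? with
        | some e => e.2.1
        | none => init
      match adj.get? cur with
      | none => none  -- neighbors == None
      | some nb =>
        nb.items.foldl (fun acc wm =>
          (PySem.List.pyRange 1 (wm.2 + 1) 1).foldl (fun acc2 label =>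
            match acc2 with
            | some p => some p
            | none =>
              let edge : Int × Int × Int := (cur, wm.1, label)
              if PySem.Set.contains visited edge then none
              else if path.getLast? = some (wm.1, cur, label) then none  -- U-turn
              else pvBacktrackA M adj fuel (path ++ [edge]) (PySem.Set.add visited edge) init)
            acc) none

def findDoubleTracing (G : Int × Int × (List (Int × List (Int × Int)))) :
    Option (List (Int × Int × Int)) :=
  let adj := pvAdj G.2.2
  (PySem.List.pyRange 1 (G.1 + 1) 1).foldl (fun acc initialVertex =>
    match acc with
    | some p => some p
    | none => pvBacktrackA G.2.1 adj ((pvAllCands adj).length + 2) [] PySem.Set.empty initialVertex)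
    none

-- ===== PORT B =====
-- B's `_candidates` generator, materialized: the candidate edges out of `v` in A's order
def pvCands (adj : PySem.Dict Int (PySem.Dict Int Int)) (v : Int) : List (Int × Int × Int) :=
  match adj.get? v with
  | none => []
  | some nb =>
    nb.items.flatMap (fun wm =>
      (PySem.List.pyRange 1 (wm.2 + 1) 1).map (fun label => (v, wm.1, label)))

-- B's `for edge in top: … break / else` over the paused generator: first usable candidate
-- together with the rest of the iterator
def pvNextCand (visited : PySem.Set (Int × Int × Int)) (path : List (Int × Int × Int)) :
    List (Int × Int × Int) → Option ((Int × Int × Int) × List (Int × Int × Int))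
  | [] => none
  | e :: es =>
    if PySem.Set.contains visited e then pvNextCand visited path es
    else if path.getLast? = some (e.2.1, e.1, e.2.2) then pvNextCand visited path es
    else some (e, es)

-- B's `while stack:` loop; the stack holds each frame's not-yet-consumed candidates
def pvLoopB (target : Int) (adj : PySem.Dict Int (PySem.Dict Int Int)) :
    Nat → List (List (Int × Int × Int)) → List (Int × Int × Int) →
      PySem.Set (Int × Int × Int) → Option (List (Int × Int × Int))
  | 0, _, _, _ => none  -- fuel guard only; never reached
  | _ + 1, [], _, _ => none
  | fuel + 1, top :: rest, path, visited =>
    if (path.length : Int) = target then some path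
    else
      match pvNextCand visited path top with
      | some (e, es) =>
        pvLoopB target adj fuel (pvCands adj e.2.1 :: es :: rest) (path ++ [e])
          (PySem.Set.add visited e)
      | none =>
        match rest with
        | [] => none  -- stack becomes empty: while-loop ends
        | _ :: _ =>
          -- undone = currentPath.pop(); visitedEdges.remove(undone) — undone is always
          -- a member of visitedEdges, so set.remove behaves as discard here
          pvLoopB target adj fuel rest path.dropLast
            (match path.getLast? with
             | some u => PySem.Set.discard visited u
             | none => visited)

def findDoubleTracing_alt (G : Int × Int × (List (Int × List (Int × Int)))) :
    Option (List (Int × Int × Int)) :=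
  let adj := pvAdj G.2.2
  let target := 2 * G.2.1
  let fuel := ((pvAllCands adj).length + 3) ^ ((pvAllCands adj).length + 4)
  (PySem.List.pyRange 1 (G.1 + 1) 1).foldl (fun acc initialVertex =>
    match acc with
    | some p => some p
    | none => pvLoopB target adj fuel [pvCands adj initialVertex] [] PySem.Set.empty) none

-- ===== PRECONDITION & SPEC =====
def Spec_findDoubleTracing (G : Int × Int × (List (Int × List (Int × Int)))) (out : Option (List (Int × Int × Int))) : Prop := out = findDoubleTracing_alt G
instance (G : Int × Int × (List (Int × List (Int × Int)))) (out : Option (List (Int × Int × Int))) : Decidable (Spec_findDoubleTracing G out) := by unfold Spec_findDoubleTracing; infer_instance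

-- ===== CLAIM (what is proved, stated in full; the proofs are below) =====
def Claim_equal_findDoubleTracing : Prop := ∀ (G : Int × Int × (List (Int × List (Int × Int)))), Dom_findDoubleTracing G → Spec_findDoubleTracing G (findDoubleTracing G)

-- ===== LEMMAS AND PROOFS =====

-- A's scan of a candidate list, flattened: recursive form of the nested foldl in pvBacktrackA
def pvScanA (M : Int) (adj : PySem.Dict Int (PySem.Dict Int Int)) (init : Int) (n : Nat)
    (path : List (Int × Int × Int)) (visited : PySem.Set (Int × Int × Int)) :
    List (Int × Int × Int) → Option (List (Int × Int × Int))
  | [] => none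
  | e :: es =>
    if PySem.Set.contains visited e then pvScanA M adj init n path visited es
    else if path.getLast? = some (e.2.1, e.1, e.2.2) then pvScanA M adj init n path visited es
    else
      match pvBacktrackA M adj n (path ++ [e]) (PySem.Set.add visited e) init with
      | some p => some p
      | none => pvScanA M adj init n path visited es

def pvCur (path : List (Int × Int × Int)) (init : Int) : Int :=
  match path.getLast? with
  | some e => e.2.1
  | none => init

def pvFrameRun (M : Int) (adj : PySem.Dict Int (PySem.Dict Int Int)) (init : Int) (n : Nat)
    (es path : List (Int × Int × Int)) (visited : PySem.Set (Int × Int × Int)) :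
    Option (List (Int × Int × Int)) :=
  if (path.length : Int) = 2 * M then some path else pvScanA M adj init n path visited es

-- number of still unvisited candidates, plus one: bound on A's remaining recursion depth
def pvUnvis (adj : PySem.Dict Int (PySem.Dict Int Int))
    (visited : PySem.Set (Int × Int × Int)) : Nat :=
  ((pvAllCands adj).filter (fun e => !PySem.Set.contains visited e)).length + 1

-- potential of B's stack: strictly decreases at every loop iteration
def pvPhi (K k : Nat) : List (List (Int × Int × Int)) → Nat
  | [] => 0
  | fr :: rest => (fr.length + 1) * K ^ (k - rest.length) + pvPhi K k rest

-- loop invariant of B's state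
def pvInv (adj : PySem.Dict Int (PySem.Dict Int Int))
    (stack : List (List (Int × Int × Int))) (path : List (Int × Int × Int))
    (visited : PySem.Set (Int × Int × Int)) : Prop :=
  stack.length = path.length + 1 ∧
  path.Nodup ∧
  (∀ e ∈ path, e ∈ pvAllCands adj) ∧
  (∀ e ∈ path, PySem.Set.contains visited e = true) ∧
  (∀ fr ∈ stack, ∀ e ∈ fr, e ∈ pvAllCands adj)

-- ---------- small set facts ----------

theorem pv_contains_add {s : PySem.Set (Int × Int × Int)} {x y : Int × Int × Int} :
    PySem.Set.contains (PySem.Set.add s x) y = true ↔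
      PySem.Set.contains s y = true ∨ y = x := by
  simp [PySem.Set.contains, PySem.Set.add]
  split <;> simp_all

theorem pv_discard_add {s : PySem.Set (Int × Int × Int)} {x : Int × Int × Int}
    (h : PySem.Set.contains s x = false) :
    PySem.Set.discard (PySem.Set.add s x) x = s := by
  simp [PySem.Set.contains] at h
  simp [PySem.Set.add, PySem.Set.discard, PySem.Set.contains, h]
  rintro a b c hm rfl
  exact h hm

theorem pv_contains_discard {s : PySem.Set (Int × Int × Int)} {x y : Int × Int × Int}
    (hne : y ≠ x) (h : PySem.Set.contains s y = true) :
    PySem.Set.contains (PySem.Set.discard s x) y = true := by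
  simp [PySem.Set.contains, PySem.Set.discard] at *
  exact ⟨h, hne⟩

-- ---------- counting facts ----------

theorem pv_filter_length_lt {l : List (Int × Int × Int)} {p q : (Int × Int × Int) → Bool}
    {e : Int × Int × Int} (he : e ∈ l) (hpe : p e = true) (hqe : q e = false)
    (himp : ∀ x, q x = true → p x = true) :
    (l.filter q).length < (l.filter p).length := by
  have h1 : l.filter q = (l.filter p).filter q := by
    rw [List.filter_filter]
    apply List.filter_congr
    intro x hx
    cases hq : q x
    · simp
    · simp [himp x hq]
  rw [h1]
  apply List.length_filter_lt_length_iff_exists.mpr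
  exact ⟨e, List.mem_filter.mpr ⟨he, hpe⟩, by simp [hqe]⟩

theorem pv_unvis_add_lt {adj : PySem.Dict Int (PySem.Dict Int Int)}
    {visited : PySem.Set (Int × Int × Int)} {e : Int × Int × Int}
    (he : e ∈ pvAllCands adj) (hc : PySem.Set.contains visited e = false) :
    pvUnvis adj (PySem.Set.add visited e) < pvUnvis adj visited := by
  unfold pvUnvis
  have key := pv_filter_length_lt (l := pvAllCands adj)
    (p := fun x => !PySem.Set.contains visited x)
    (q := fun x => !PySem.Set.contains (PySem.Set.add visited e) x)
    (e := e) he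
    (by show (!PySem.Set.contains visited e) = true; rw [hc]; rfl)
    (by
      show (!PySem.Set.contains (PySem.Set.add visited e) e) = false
      rw [pv_contains_add.mpr (Or.inr rfl)]; rfl)
    (by
      intro x hx
      show (!PySem.Set.contains visited x) = true
      cases hcx : PySem.Set.contains visited x
      · rfl
      · exfalso
        have h2 : PySem.Set.contains (PySem.Set.add visited e) x = true :=
          pv_contains_add.mpr (Or.inl hcx)
        simp only [h2] at hx
        simp at hx)
  omega

-- ---------- candidate-list facts ----------

theorem pv_mem_cands_allCands {adj : PySem.Dict Int (PySem.Dict Int Int)} {v : Int}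
    {e : Int × Int × Int} (he : e ∈ pvCands adj v) : e ∈ pvAllCands adj := by
  unfold pvCands at he
  cases hg : adj.get? v with
  | none => rw [hg] at he; simp at he
  | some nb =>
    rw [hg] at he
    have hmem := PySem.Dict.mem_items_of_get?_eq_some adj hg
    unfold pvAllCands
    exact List.mem_flatMap.mpr ⟨(v, nb), hmem, he⟩

theorem pv_length_cands_le {adj : PySem.Dict Int (PySem.Dict Int Int)} {v : Int} :
    (pvCands adj v).length ≤ (pvAllCands adj).length := by
  cases hg : adj.get? v with
  | none => simp [pvCands, hg]
  | some nb =>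
    have hmem := PySem.Dict.mem_items_of_get?_eq_some adj hg
    have hc : pvCands adj v = nb.items.flatMap (fun wm =>
        (PySem.List.pyRange 1 (wm.2 + 1) 1).map (fun label => (v, wm.1, label))) := by
      unfold pvCands; rw [hg]
    unfold pvAllCands
    rw [List.length_flatMap]
    apply List.single_le_sum (l := adj.items.map (fun vn => (vn.2.items.flatMap (fun wm =>
      (PySem.List.pyRange 1 (wm.2 + 1) 1).map (fun label => (vn.1, wm.1, label)))).length))
      (by simp)
    apply List.mem_map.mpr
    exact ⟨(v, nb), hmem, by rw [hc]⟩

-- ---------- pvNextCand facts ----------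

theorem pv_next_some {visited : PySem.Set (Int × Int × Int)} {path es es' : List (Int × Int × Int)}
    {e : Int × Int × Int} (h : pvNextCand visited path es = some (e, es')) :
    e ∈ es ∧ (∀ x ∈ es', x ∈ es) ∧ es'.length < es.length ∧
      PySem.Set.contains visited e = false := by
  induction es generalizing es' with
  | nil => simp [pvNextCand] at h
  | cons a as ih =>
    unfold pvNextCand at h
    by_cases h1 : PySem.Set.contains visited a
    · rw [if_pos h1] at h
      obtain ⟨hmem, hsub, hlen, hc⟩ := ih h
      exact ⟨List.mem_cons_of_mem _ hmem, fun x hx => List.mem_cons_of_mem _ (hsub x hx),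
        Nat.lt_succ_of_lt hlen, hc⟩
    · rw [if_neg h1] at h
      by_cases h2 : path.getLast? = some (a.2.1, a.1, a.2.2)
      · rw [if_pos h2] at h
        obtain ⟨hmem, hsub, hlen, hc⟩ := ih h
        exact ⟨List.mem_cons_of_mem _ hmem, fun x hx => List.mem_cons_of_mem _ (hsub x hx),
          Nat.lt_succ_of_lt hlen, hc⟩
      · rw [if_neg h2] at h
        obtain ⟨rfl, rfl⟩ : a = e ∧ as = es' := by
          simpa using h
        exact ⟨List.mem_cons_self, fun x hx => List.mem_cons_of_mem _ hx,
          Nat.lt_succ_self _, by simpa using h1⟩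

theorem pv_scan_of_next_some (M : Int) (adj : PySem.Dict Int (PySem.Dict Int Int)) (init : Int)
    (n : Nat) {visited : PySem.Set (Int × Int × Int)} {path es es' : List (Int × Int × Int)}
    {e : Int × Int × Int} (h : pvNextCand visited path es = some (e, es')) :
    pvScanA M adj init n path visited es =
      match pvBacktrackA M adj n (path ++ [e]) (PySem.Set.add visited e) init with
      | some p => some p
      | none => pvScanA M adj init n path visited es' := by
  induction es generalizing es' with
  | nil => simp [pvNextCand] at h
  | cons a as ih =>
    unfold pvNextCand at h
    by_cases h1 : PySem.Set.contains visited a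
    · rw [if_pos h1] at h
      rw [pvScanA, if_pos h1]
      exact ih h
    · rw [if_neg h1] at h
      by_cases h2 : path.getLast? = some (a.2.1, a.1, a.2.2)
      · rw [if_pos h2] at h
        rw [pvScanA, if_neg h1, if_pos h2]
        exact ih h
      · rw [if_neg h2] at h
        obtain ⟨rfl, rfl⟩ : a = e ∧ as = es' := by simpa using h
        rw [pvScanA, if_neg h1, if_neg h2]

theorem pv_scan_of_next_none (M : Int) (adj : PySem.Dict Int (PySem.Dict Int Int)) (init : Int)
    (n : Nat) {visited : PySem.Set (Int × Int × Int)} {path es : List (Int × Int × Int)}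
    (h : pvNextCand visited path es = none) :
    pvScanA M adj init n path visited es = none := by
  induction es with
  | nil => rfl
  | cons a as ih =>
    unfold pvNextCand at h
    by_cases h1 : PySem.Set.contains visited a
    · rw [if_pos h1] at h
      rw [pvScanA, if_pos h1]
      exact ih h
    · rw [if_neg h1] at h
      by_cases h2 : path.getLast? = some (a.2.1, a.1, a.2.2)
      · rw [if_pos h2] at h
        rw [pvScanA, if_neg h1, if_pos h2]
        exact ih h
      · rw [if_neg h2] at h
        simp at h

-- ---------- A-link: one unfolding of pvBacktrackA is a pvFrameRun over pvCands ----------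

theorem pv_foldl_scan (M : Int) (adj : PySem.Dict Int (PySem.Dict Int Int)) (init : Int)
    (n : Nat) (path : List (Int × Int × Int)) (visited : PySem.Set (Int × Int × Int)) :
    ∀ (l : List (Int × Int × Int)) (acc : Option (List (Int × Int × Int))),
      l.foldl (fun acc2 e =>
        match acc2 with
        | some p => some p
        | none =>
          if PySem.Set.contains visited e then none
          else if path.getLast? = some (e.2.1, e.1, e.2.2) then none
          else pvBacktrackA M adj n (path ++ [e]) (PySem.Set.add visited e) init) acc =
      match acc with
      | some p => some p
      | none => pvScanA M adj init n path visited l := by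
  intro l
  induction l with
  | nil => intro acc; cases acc <;> rfl
  | cons e es ih =>
    intro acc
    cases acc with
    | some p =>
      rw [List.foldl_cons]
      exact ih (some p)
    | none =>
      rw [List.foldl_cons, ih]
      rw [pvScanA]
      by_cases h1 : PySem.Set.contains visited e
      · rw [if_pos h1, if_pos h1]
      · rw [if_neg h1, if_neg h1]
        by_cases h2 : path.getLast? = some (e.2.1, e.1, e.2.2)
        · rw [if_pos h2, if_pos h2]
        · simp only [if_neg h2]

theorem pv_foldl_scan_none (M : Int) (adj : PySem.Dict Int (PySem.Dict Int Int)) (init : Int)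
    (n : Nat) (path : List (Int × Int × Int)) (visited : PySem.Set (Int × Int × Int))
    (l : List (Int × Int × Int)) :
    l.foldl (fun acc2 e =>
        match acc2 with
        | some p => some p
        | none =>
          if PySem.Set.contains visited e then none
          else if path.getLast? = some (e.2.1, e.1, e.2.2) then none
          else pvBacktrackA M adj n (path ++ [e]) (PySem.Set.add visited e) init) none =
      pvScanA M adj init n path visited l := by
  rw [pv_foldl_scan]

theorem pv_backtrackA_succ (M : Int) (adj : PySem.Dict Int (PySem.Dict Int Int)) (n : Nat)
    (path : List (Int × Int × Int)) (visited : PySem.Set (Int × Int × Int)) (init : Int) :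
    pvBacktrackA M adj (n + 1) path visited init =
      pvFrameRun M adj init n (pvCands adj (pvCur path init)) path visited := by
  simp only [pvBacktrackA, pvFrameRun]
  by_cases hl : (path.length : Int) = 2 * M
  · simp only [if_pos hl]
  · simp only [if_neg hl]
    have hcur : (match path.getLast? with
        | some e => e.2.1
        | none => init) = pvCur path init := rfl
    rw [hcur]
    unfold pvCands
    cases hg : adj.get? (pvCur path init) with
    | none => rfl
    | some nb =>
      dsimp only
      rw [← pv_foldl_scan_none M adj init n path visited, List.foldl_flatMap]
      congr 1
      funext acc wm
      rw [List.foldl_map]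

-- ---------- phi decreases ----------

theorem pv_phi_pop {K k : Nat} (hK : 1 ≤ K) (fr : List (Int × Int × Int))
    (rest : List (List (Int × Int × Int))) :
    pvPhi K k rest < pvPhi K k (fr :: rest) := by
  rw [pvPhi]
  have h1 : 1 ≤ K ^ (k - rest.length) := Nat.one_le_pow _ _ hK
  have h2 : 1 ≤ (fr.length + 1) * K ^ (k - rest.length) :=
    Nat.le_trans h1 (Nat.le_mul_of_pos_left _ (by omega))
  omega

theorem pv_phi_push {K k : Nat} {es es' child : List (Int × Int × Int)}
    {rest : List (List (Int × Int × Int))}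
    (hK : child.length + 2 ≤ K) (hlen : es'.length < es.length)
    (hd : rest.length + 1 ≤ k) :
    pvPhi K k (child :: es' :: rest) < pvPhi K k (es :: rest) := by
  have ha : k - rest.length = (k - (rest.length + 1)) + 1 := by omega
  have hb1 : 0 < K ^ (k - (rest.length + 1)) := Nat.pow_pos (by omega)
  have key : (child.length + 1) * K ^ (k - (rest.length + 1))
      + (es'.length + 1) * K ^ (k - rest.length)
      < (es.length + 1) * K ^ (k - rest.length) := by
    rw [ha, pow_succ]
    set b := K ^ (k - (rest.length + 1)) with hbdef
    have h1 : (child.length + 1) * b < K * b :=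
      (Nat.mul_lt_mul_right hb1).mpr (by omega)
    have h2 : K * b + (es'.length + 1) * (b * K) ≤ (es.length + 1) * (b * K) := by
      have h3 : (es'.length + 2) * (b * K) ≤ (es.length + 1) * (b * K) :=
        Nat.mul_le_mul_right _ (by omega)
      calc K * b + (es'.length + 1) * (b * K) = (es'.length + 2) * (b * K) := by ring
        _ ≤ _ := h3
    omega
  have hlist : (es' :: rest).length = rest.length + 1 := rfl
  rw [pvPhi, pvPhi, pvPhi, hlist]
  omega

-- ---------- invariant facts ----------

theorem pv_inv_depth {adj : PySem.Dict Int (PySem.Dict Int Int)}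
    {stack : List (List (Int × Int × Int))} {path : List (Int × Int × Int)}
    {visited : PySem.Set (Int × Int × Int)} (h : pvInv adj stack path visited) :
    stack.length ≤ (pvAllCands adj).length + 1 := by
  obtain ⟨hlen, hnd, hsub, -, -⟩ := h
  have := List.Subperm.length_le (List.Nodup.subperm hnd hsub)
  omega

theorem pv_inv_push {adj : PySem.Dict Int (PySem.Dict Int Int)}
    {es es' path : List (Int × Int × Int)} {rest : List (List (Int × Int × Int))}
    {visited : PySem.Set (Int × Int × Int)} {e : Int × Int × Int}
    (hinv : pvInv adj (es :: rest) path visited)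
    (hnext : pvNextCand visited path es = some (e, es')) :
    pvInv adj (pvCands adj e.2.1 :: es' :: rest) (path ++ [e])
      (PySem.Set.add visited e) := by
  obtain ⟨hlen, hnd, hsub, hvis, hfr⟩ := hinv
  obtain ⟨hmem, hsubes, -, hc⟩ := pv_next_some hnext
  have heall : e ∈ pvAllCands adj := hfr es List.mem_cons_self e hmem
  have henp : e ∉ path := fun hp => by rw [hvis e hp] at hc; cases hc
  refine ⟨by simp at hlen ⊢; omega, ?_, ?_, ?_, ?_⟩
  · refine List.Nodup.append hnd (List.nodup_singleton _) ?_
    intro x hx hx'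
    simp at hx'
    exact henp (hx' ▸ hx)
  · intro x hx
    rcases List.mem_append.mp hx with h | h
    · exact hsub x h
    · simp at h; subst h; exact heall
  · intro x hx
    rcases List.mem_append.mp hx with h | h
    · exact pv_contains_add.mpr (Or.inl (hvis x h))
    · simp at h; subst h; exact pv_contains_add.mpr (Or.inr rfl)
  · intro fr hfr' x hx
    rcases List.mem_cons.mp hfr' with h | hfr2
    · subst h; exact pv_mem_cands_allCands hx
    · rcases List.mem_cons.mp hfr2 with h | h
      · subst h; exact hfr es List.mem_cons_self x (hsubes x hx)
      · exact hfr fr (List.mem_cons_of_mem _ h) x hx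

theorem pv_inv_pop {adj : PySem.Dict Int (PySem.Dict Int Int)}
    {es path : List (Int × Int × Int)} {rest : List (List (Int × Int × Int))}
    {visited : PySem.Set (Int × Int × Int)}
    (hinv : pvInv adj (es :: rest) path visited) (hne : rest ≠ []) :
    pvInv adj rest path.dropLast
      (match path.getLast? with
       | some u => PySem.Set.discard visited u
       | none => visited) := by
  obtain ⟨hlen, hnd, hsub, hvis, hfr⟩ := hinv
  have hpn : path ≠ [] := by
    intro h; subst h
    simp at hlen
    exact hne hlen
  rcases List.eq_nil_or_concat path with h | ⟨p', u, rfl⟩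
  · exact absurd h hpn
  simp only [List.concat_eq_append] at hlen hnd hsub hvis ⊢
  rw [List.getLast?_concat, List.dropLast_concat]
  have hup : u ∉ p' := fun hu =>
    (List.nodup_append.mp hnd).2.2 u hu u (by simp) rfl
  refine ⟨by simp at hlen ⊢; omega, ?_, ?_, ?_, ?_⟩
  · exact (List.nodup_append.mp hnd).1
  · intro x hx; exact hsub x (List.mem_append.mpr (Or.inl hx))
  · intro x hx
    exact pv_contains_discard (fun hxe => hup (hxe ▸ hx))
      (hvis x (List.mem_append.mpr (Or.inl hx)))
  · intro fr hfr' x hx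
    exact hfr fr (List.mem_cons_of_mem _ hfr') x hx

-- ---------- B is fuel-stable above the potential ----------

theorem pv_loopB_stable (target : Int) (adj : PySem.Dict Int (PySem.Dict Int Int))
    (n : Nat) :
    ∀ f g stack path visited, pvInv adj stack path visited →
      pvPhi ((pvAllCands adj).length + 3) ((pvAllCands adj).length + 3) stack < n →
      n ≤ f → n ≤ g →
      pvLoopB target adj f stack path visited = pvLoopB target adj g stack path visited := by
  induction n using Nat.strong_induction_on with
  | _ n IH =>
  intro f g stack path visited hinv hphi hf hg
  obtain ⟨f', rfl⟩ : ∃ f', f = f' + 1 := ⟨f - 1, by omega⟩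
  obtain ⟨g', rfl⟩ : ∃ g', g = g' + 1 := ⟨g - 1, by omega⟩
  cases stack with
  | nil => rfl
  | cons es rest =>
    simp only [pvLoopB]
    by_cases htgt : (path.length : Int) = target
    · rw [if_pos htgt, if_pos htgt]
    rw [if_neg htgt, if_neg htgt]
    set K := (pvAllCands adj).length + 3 with hK
    cases hnext : pvNextCand visited path es with
    | some pr =>
      obtain ⟨e, es'⟩ := pr
      show pvLoopB target adj f' _ _ _ = pvLoopB target adj g' _ _ _
      have hphi' : pvPhi K K (pvCands adj e.2.1 :: es' :: rest) < pvPhi K K (es :: rest) := by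
        apply pv_phi_push
        · have := pv_length_cands_le (adj := adj) (v := e.2.1); omega
        · exact (pv_next_some hnext).2.2.1
        · have := pv_inv_depth hinv
          simp at this ⊢
          omega
      exact IH (n - 1) (by omega) f' g' _ _ _
        (pv_inv_push hinv hnext) (by omega) (by omega) (by omega)
    | none =>
      cases rest with
      | nil => rfl
      | cons r rs =>
        show pvLoopB target adj f' _ _ _ = pvLoopB target adj g' _ _ _
        have hphi' : pvPhi K K (r :: rs) < pvPhi K K (es :: r :: rs) :=
          pv_phi_pop (by omega) _ _
        exact IH (n - 1) (by omega) f' g' _ _ _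
          (pv_inv_pop hinv (by simp)) (by omega) (by omega) (by omega)

-- ---------- the simulation: B's stack loop runs A's scan frame by frame ----------

-- what B's loop does after the top frame is exhausted
def pvPop (M : Int) (adj : PySem.Dict Int (PySem.Dict Int Int))
    (rest : List (List (Int × Int × Int))) (path : List (Int × Int × Int))
    (visited : PySem.Set (Int × Int × Int)) : Option (List (Int × Int × Int)) :=
  match rest with
  | [] => none
  | _ :: _ =>
    pvLoopB (2 * M) adj
      (pvPhi ((pvAllCands adj).length + 3) ((pvAllCands adj).length + 3) rest + 1)
      rest path.dropLast
      (match path.getLast? with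
       | some u => PySem.Set.discard visited u
       | none => visited)

theorem pv_sim (M : Int) (adj : PySem.Dict Int (PySem.Dict Int Int)) (n : Nat)
    (es path : List (Int × Int × Int)) (visited : PySem.Set (Int × Int × Int))
    (rest : List (List (Int × Int × Int))) (init : Int)
    (hinv : pvInv adj (es :: rest) path visited)
    (hn : pvUnvis adj visited ≤ n) :
    pvLoopB (2 * M) adj
        (pvPhi ((pvAllCands adj).length + 3) ((pvAllCands adj).length + 3) (es :: rest) + 1)
        (es :: rest) path visited =
      match pvFrameRun M adj init n es path visited with
      | some q => some q
      | none => pvPop M adj rest path visited := by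
  simp only [pvLoopB]
  by_cases htgt : (path.length : Int) = 2 * M
  · have hfr : pvFrameRun M adj init n es path visited = some path := by
      unfold pvFrameRun; rw [if_pos htgt]
    rw [hfr, if_pos htgt]
  · have hfr : pvFrameRun M adj init n es path visited =
        pvScanA M adj init n path visited es := by
      unfold pvFrameRun; rw [if_neg htgt]
    rw [hfr, if_neg htgt]
    cases hnext : pvNextCand visited path es with
    | none =>
      rw [pv_scan_of_next_none M adj init n hnext]
      cases rest with
      | nil => rfl
      | cons r rs =>
        simp only [pvPop]
        have hinv' := pv_inv_pop hinv (by simp)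
        have hlt := pv_phi_pop (K := (pvAllCands adj).length + 3)
          (k := (pvAllCands adj).length + 3) (by omega) es (r :: rs)
        exact pv_loopB_stable (2 * M) adj
          (pvPhi ((pvAllCands adj).length + 3) ((pvAllCands adj).length + 3) (r :: rs) + 1)
          _ _ _ _ _ hinv' (by omega) (by omega) (by omega)
    | some pr =>
      obtain ⟨e, es'⟩ := pr
      dsimp only
      obtain ⟨hmem, hsubes, hlt_es, hcfalse⟩ := pv_next_some hnext
      have heall : e ∈ pvAllCands adj := hinv.2.2.2.2 es List.mem_cons_self e hmem
      have hone : 1 ≤ pvUnvis adj visited := by unfold pvUnvis; omega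
      obtain ⟨m, hm⟩ : ∃ m, n = m + 1 := ⟨n - 1, by omega⟩
      have hinvP := pv_inv_push hinv hnext
      have hphiP : pvPhi ((pvAllCands adj).length + 3) ((pvAllCands adj).length + 3)
            (pvCands adj e.2.1 :: es' :: rest) <
          pvPhi ((pvAllCands adj).length + 3) ((pvAllCands adj).length + 3) (es :: rest) := by
        apply pv_phi_push
        · have := pv_length_cands_le (adj := adj) (v := e.2.1); omega
        · exact hlt_es
        · have := pv_inv_depth hinv; simp at this; omega
      have hstab : pvLoopB (2 * M) adj
            (pvPhi ((pvAllCands adj).length + 3) ((pvAllCands adj).length + 3) (es :: rest))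
            (pvCands adj e.2.1 :: es' :: rest) (path ++ [e]) (PySem.Set.add visited e) =
          pvLoopB (2 * M) adj
            (pvPhi ((pvAllCands adj).length + 3) ((pvAllCands adj).length + 3)
              (pvCands adj e.2.1 :: es' :: rest) + 1)
            (pvCands adj e.2.1 :: es' :: rest) (path ++ [e]) (PySem.Set.add visited e) :=
        pv_loopB_stable (2 * M) adj
          (pvPhi ((pvAllCands adj).length + 3) ((pvAllCands adj).length + 3)
            (pvCands adj e.2.1 :: es' :: rest) + 1)
          _ _ _ _ _ hinvP (by omega) (by omega) (by omega)
      have hunv : pvUnvis adj (PySem.Set.add visited e) ≤ m := by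
        have := pv_unvis_add_lt heall hcfalse; omega
      have hrec1 := pv_sim M adj m (pvCands adj e.2.1) (path ++ [e])
        (PySem.Set.add visited e) (es' :: rest) init hinvP hunv
      simp only [pvPop, List.getLast?_concat, List.dropLast_concat,
        pv_discard_add hcfalse] at hrec1
      have hinv2 : pvInv adj (es' :: rest) path visited := by
        obtain ⟨h1, h2, h3, h4, h5⟩ := hinv
        refine ⟨by simpa using h1, h2, h3, h4, ?_⟩
        intro fr hfr' x hx
        rcases List.mem_cons.mp hfr' with h | h
        · subst h; exact h5 es List.mem_cons_self x (hsubes x hx)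
        · exact h5 fr (List.mem_cons_of_mem _ h) x hx
      have hrec2 := pv_sim M adj n es' path visited rest init hinv2 hn
      have hfr2 : pvFrameRun M adj init n es' path visited =
          pvScanA M adj init n path visited es' := by
        unfold pvFrameRun; rw [if_neg htgt]
      have hAl := pv_backtrackA_succ M adj m (path ++ [e]) (PySem.Set.add visited e) init
      have hcur2 : pvCur (path ++ [e]) init = e.2.1 := by
        unfold pvCur; rw [List.getLast?_concat]
      rw [hcur2] at hAl
      rw [pv_scan_of_next_some M adj init n hnext, hm, hAl, ← hm, ← hfr2, hstab, hrec1, hrec2]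
      cases pvFrameRun M adj init m (pvCands adj e.2.1) (path ++ [e])
        (PySem.Set.add visited e) <;> rfl
termination_by (n, es.length)

-- ---------- assembling the two ports ----------

theorem pv_main (M : Int) (adj : PySem.Dict Int (PySem.Dict Int Int)) (iv : Int) :
    pvBacktrackA M adj ((pvAllCands adj).length + 2) [] PySem.Set.empty iv =
      pvLoopB (2 * M) adj (((pvAllCands adj).length + 3) ^ ((pvAllCands adj).length + 4))
        [pvCands adj iv] [] PySem.Set.empty := by
  have hinv : pvInv adj [pvCands adj iv] [] PySem.Set.empty := by
    refine ⟨rfl, List.nodup_nil, by simp, by simp, ?_⟩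
    intro fr hfr x hx
    rcases List.mem_cons.mp hfr with h | h
    · subst h; exact pv_mem_cands_allCands hx
    · simp at h
  have hunv : pvUnvis adj PySem.Set.empty = (pvAllCands adj).length + 1 := by
    unfold pvUnvis
    have h0 : (pvAllCands adj).filter (fun e => !PySem.Set.contains PySem.Set.empty e) =
        pvAllCands adj := List.filter_eq_self.mpr (fun a _ => rfl)
    rw [h0]
  have hphi1 : pvPhi ((pvAllCands adj).length + 3) ((pvAllCands adj).length + 3)
      [pvCands adj iv] < ((pvAllCands adj).length + 3) ^ ((pvAllCands adj).length + 4) := by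
    have hexp : ((pvAllCands adj).length + 3 : Nat)
        - List.length ([] : List (List (Int × Int × Int))) = (pvAllCands adj).length + 3 := rfl
    rw [pvPhi, pvPhi, hexp]
    have h1 : (pvCands adj iv).length + 1 ≤ (pvAllCands adj).length + 2 := by
      have := pv_length_cands_le (adj := adj) (v := iv); omega
    have hp : 0 < ((pvAllCands adj).length + 3) ^ ((pvAllCands adj).length + 3) :=
      Nat.pow_pos (by omega)
    calc ((pvCands adj iv).length + 1) *
          ((pvAllCands adj).length + 3) ^ ((pvAllCands adj).length + 3) + 0
        ≤ ((pvAllCands adj).length + 2) *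
          ((pvAllCands adj).length + 3) ^ ((pvAllCands adj).length + 3) := by
          have := Nat.mul_le_mul_right
            (((pvAllCands adj).length + 3) ^ ((pvAllCands adj).length + 3)) h1
          omega
      _ < ((pvAllCands adj).length + 3) *
          ((pvAllCands adj).length + 3) ^ ((pvAllCands adj).length + 3) :=
          (Nat.mul_lt_mul_right hp).mpr (by omega)
      _ = ((pvAllCands adj).length + 3) ^ ((pvAllCands adj).length + 3) *
          ((pvAllCands adj).length + 3) := Nat.mul_comm _ _
      _ = ((pvAllCands adj).length + 3) ^ ((pvAllCands adj).length + 4) := by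
          rw [← pow_succ]
  have hstab : pvLoopB (2 * M) adj
        (((pvAllCands adj).length + 3) ^ ((pvAllCands adj).length + 4))
        [pvCands adj iv] [] PySem.Set.empty =
      pvLoopB (2 * M) adj
        (pvPhi ((pvAllCands adj).length + 3) ((pvAllCands adj).length + 3)
          [pvCands adj iv] + 1)
        [pvCands adj iv] [] PySem.Set.empty :=
    pv_loopB_stable (2 * M) adj
      (pvPhi ((pvAllCands adj).length + 3) ((pvAllCands adj).length + 3)
        [pvCands adj iv] + 1) _ _ _ _ _
      hinv (by omega) (by omega) (by omega)
  have hsim := pv_sim M adj ((pvAllCands adj).length + 1) (pvCands adj iv) []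
    PySem.Set.empty [] iv hinv (by omega)
  have hAl := pv_backtrackA_succ M adj ((pvAllCands adj).length + 1) [] PySem.Set.empty iv
  have hcur : pvCur ([] : List (Int × Int × Int)) iv = iv := rfl
  rw [hcur] at hAl
  rw [hAl, hstab, hsim]
  cases pvFrameRun M adj iv ((pvAllCands adj).length + 1) (pvCands adj iv) []
    PySem.Set.empty <;> rfl

-- ===== VERDICT (by name: the statement is the Claim_ definition above) =====
theorem findDoubleTracing_spec : Claim_equal_findDoubleTracing := by
  intro G _
  unfold Spec_findDoubleTracing
  simp only [findDoubleTracing, findDoubleTracing_alt]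
  have hstep : (fun (acc : Option (List (Int × Int × Int))) (initialVertex : Int) =>
      match acc with
      | some p => some p
      | none => pvBacktrackA G.2.1 (pvAdj G.2.2) ((pvAllCands (pvAdj G.2.2)).length + 2) []
          PySem.Set.empty initialVertex) =
      (fun (acc : Option (List (Int × Int × Int))) (initialVertex : Int) =>
      match acc with
      | some p => some p
      | none => pvLoopB (2 * G.2.1) (pvAdj G.2.2)
          (((pvAllCands (pvAdj G.2.2)).length + 3) ^ ((pvAllCands (pvAdj G.2.2)).length + 4))
          [pvCands (pvAdj G.2.2) initialVertex] [] PySem.Set.empty) := by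
    funext acc iv
    cases acc with
    | some p => rfl
    | none => exact pv_main G.2.1 (pvAdj G.2.2) iv
  rw [hstep]
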